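-- pv_equiv track=rewrite | github.com/jasrajbaweja/cs115 | hw6.py | count
-- ===== SOURCE A (Python) =====
-- def count(s):
--     '''This function takes string input s and returns a list of all of the consecutive counts of the same digits'''
--     if s == '':
--         return 0
--     elif len(s) == 1:
--         return 1
--     elif s[0] == s[1]:
--         return 1 + count(s[1:])
--     else:
--         return 1
-- ===== SOURCE B (Python) =====
-- def count(s):
--     if s == '':
--         return 0
--     n = 1
--     for i in range(1, len(s)):
--         if s[i] == s[i - 1]:
--             n += 1
--         else:
--             break
--     return n
-- ===== Notes on version B (the rewrite author's own statement) =====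
-- stated objective: simpler
-- what changed: Replaces the self-recursion with repeated slicing (s[1:]) by a single iterative pass with a counter that breaks at the first adjacent mismatch.
import Mathlib
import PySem

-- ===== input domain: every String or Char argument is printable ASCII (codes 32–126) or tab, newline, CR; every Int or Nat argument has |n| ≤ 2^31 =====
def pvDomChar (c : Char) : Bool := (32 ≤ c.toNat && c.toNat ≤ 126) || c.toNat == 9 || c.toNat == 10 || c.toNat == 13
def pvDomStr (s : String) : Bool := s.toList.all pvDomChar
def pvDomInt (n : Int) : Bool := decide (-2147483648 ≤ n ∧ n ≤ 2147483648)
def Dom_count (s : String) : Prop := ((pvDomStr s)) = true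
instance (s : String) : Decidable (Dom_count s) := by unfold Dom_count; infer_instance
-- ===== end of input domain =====

-- B replaces A's self-recursion on s[1:] with one iterative pass and a counter (simpler, no slice copies).
-- ===== PORT A =====
-- literal recursion of A over the character list: '' -> 0, single -> 1, s[0]==s[1] -> 1 + count(s[1:]), else 1
def countRecA : List Char → Int
  | [] => 0
  | [_] => 1
  | c :: d :: t => if c == d then 1 + countRecA (d :: t) else 1

def count (s : String) : Int := countRecA s.toList

-- ===== PORT B =====
-- B's loop: prev holds s[i-1], n the counter; increment while equal, break at the first mismatch
def countLoopB : List Char → Char → Int → Int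
  | [], _, n => n
  | c :: t, prev, n => if c == prev then countLoopB t c (n + 1) else n

def count_alt (s : String) : Int :=
  match s.toList with
  | [] => 0
  | c :: t => countLoopB t c 1

-- ===== PRECONDITION & SPEC =====
def Spec_count (s : String) (out : Int) : Prop := out = count_alt s
instance (s : String) (out : Int) : Decidable (Spec_count s out) := by unfold Spec_count; infer_instance

-- ===== CLAIM (what is proved, stated in full; the proofs are below) =====
def Claim_equal_count : Prop := ∀ (s : String), Dom_count s → Spec_count s (count s)

-- ===== LEMMAS AND PROOFS =====

-- ===== VERDICT (by name: the statement is the Claim_ definition above) =====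
lemma countLoopB_eq (t : List Char) : ∀ (c : Char) (n : Int),
    countLoopB t c n = n - 1 + countRecA (c :: t) := by
  induction t with
  | nil => intro c n; simp [countLoopB, countRecA]
  | cons d t ih =>
    intro c n
    by_cases h : d = c
    · subst h
      simp only [countLoopB, countRecA, beq_self_eq_true, if_true]
      rw [ih]; ring
    · have h1 : (d == c) = false := by simpa using h
      have h2 : (c == d) = false := by simpa using fun e => h e.symm
      simp [countLoopB, countRecA, h1, h2]

theorem count_spec : Claim_equal_count := by
  intro s _
  unfold Spec_count count count_alt
  cases s.toList with
  | nil => simp [countRecA]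
  | cons c t =>
    show countRecA (c :: t) = countLoopB t c 1
    rw [countLoopB_eq]; ring
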